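-- pv_equiv track=rewrite | github.com/school146/school-bells-v2 | timetable_handling/utils.py | sub_times
-- ===== SOURCE A (Python) =====
-- def sub_times(initial_time: str, seconds: int):
--     if seconds == 0: return initial_time
--
--     delta_mins = seconds // 60
--
--     hours = int(initial_time.split(':')[0])
--     minutes = int(initial_time.split(':')[1])
--
--     minutes -= delta_mins
--
--     while minutes < 0:
--         minutes += 60
--         hours -= 1
--
--     return f'{str(hours).zfill(2)}:{str(minutes).zfill(2)}'.zfill(5)
-- ===== SOURCE B (Python) =====
-- def sub_times(initial_time: str, seconds: int):
--     if seconds == 0: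
--         return initial_time
--
--     h_str, m_str = initial_time.split(':')[:2]
--     hours = int(h_str)
--     minutes = int(m_str) - seconds // 60
--
--     if minutes < 0:
--         hours += minutes // 60
--         minutes %= 60
--
--     return str(hours).zfill(2) + ':' + str(minutes).zfill(2)
-- ===== Notes on version B (the rewrite author's own statement) =====
-- stated objective: simpler
-- what changed: The while-loop borrow is replaced by a guarded closed form (hours += minutes // 60; minutes %= 60 when minutes < 0), the string is split once instead of twice, and the provably redundant outer zfill(5) is dropped.
import Mathlib
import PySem

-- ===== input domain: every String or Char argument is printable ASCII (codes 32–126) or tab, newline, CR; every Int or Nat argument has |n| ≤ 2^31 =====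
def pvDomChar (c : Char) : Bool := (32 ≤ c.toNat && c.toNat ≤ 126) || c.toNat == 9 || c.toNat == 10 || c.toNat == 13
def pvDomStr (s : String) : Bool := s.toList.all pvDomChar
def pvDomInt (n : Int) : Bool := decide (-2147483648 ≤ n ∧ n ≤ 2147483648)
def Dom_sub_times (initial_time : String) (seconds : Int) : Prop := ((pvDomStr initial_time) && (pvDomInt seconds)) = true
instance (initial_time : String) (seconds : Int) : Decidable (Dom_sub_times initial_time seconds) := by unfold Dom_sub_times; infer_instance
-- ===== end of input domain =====

-- B replaces A's while-loop borrow with a guarded floor-division closed form, splits once, and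
-- drops the redundant outer zfill(5); equivalence is proved on all inputs where A returns.

-- ===== PORT A =====
-- A's 'while minutes < 0: minutes += 60; hours -= 1' loop, step for step.
def pvBorrow (minutes : Int) (hours : Int) : Int × Int :=
  if minutes < 0 then pvBorrow (minutes + 60) (hours - 1) else (minutes, hours)
termination_by (-minutes).toNat
decreasing_by omega

def sub_times (initial_time : String) (seconds : Int) : String :=
  if seconds = 0 then initial_time
  else
    let delta_mins := PySem.Int.floordiv seconds 60
    -- A splits twice: int(initial_time.split(':')[0]) and int(initial_time.split(':')[1]);
    -- IndexError/ValueError (none below) are excluded by Pre_sub_times.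
    match PySem.List.pyGet? ((PySem.Str.split? initial_time ":").getD []) 0 >>= PySem.Int.ofStr?,
          PySem.List.pyGet? ((PySem.Str.split? initial_time ":").getD []) 1 >>= PySem.Int.ofStr? with
    | some hours, some minutes =>
        let r := pvBorrow (minutes - delta_mins) hours
        PySem.Str.zfill
          (PySem.Str.zfill (PySem.Int.toStr r.2) 2 ++ ":" ++ PySem.Str.zfill (PySem.Int.toStr r.1) 2) 5
    | _, _ => ""

-- ===== PORT B =====
def sub_times_alt (initial_time : String) (seconds : Int) : String :=
  if seconds = 0 then initial_time
  else
    let parts := (PySem.Str.split? initial_time ":").getD []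
    match PySem.List.pyGet? parts 0 >>= PySem.Int.ofStr? with
    | none => ""
    | some hours =>
      match PySem.List.pyGet? parts 1 >>= PySem.Int.ofStr? with
      | none => ""
      | some m0 =>
        let minutes := m0 - PySem.Int.floordiv seconds 60
        if minutes < 0 then
          PySem.Str.zfill (PySem.Int.toStr (hours + PySem.Int.floordiv minutes 60)) 2 ++ ":" ++
            PySem.Str.zfill (PySem.Int.toStr (PySem.Int.mod minutes 60)) 2
        else
          PySem.Str.zfill (PySem.Int.toStr hours) 2 ++ ":" ++
            PySem.Str.zfill (PySem.Int.toStr minutes) 2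

-- ===== PRECONDITION & SPEC =====
-- Pre_ excludes exactly the inputs where A raises: seconds ≠ 0 and the string has no ':'
-- (IndexError) or one of the first two ':'-separated fields is not int()-parsable (ValueError).
def Pre_sub_times (initial_time : String) (seconds : Int) : Prop :=
  seconds = 0 ∨
    ((PySem.List.pyGet? ((PySem.Str.split? initial_time ":").getD []) 0 >>= PySem.Int.ofStr?).isSome ∧
     (PySem.List.pyGet? ((PySem.Str.split? initial_time ":").getD []) 1 >>= PySem.Int.ofStr?).isSome)
instance (initial_time : String) (seconds : Int) : Decidable (Pre_sub_times initial_time seconds) := by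
  unfold Pre_sub_times; infer_instance

def pvWitness_sub_times : String × Int := ("10:30", 90)

def Spec_sub_times (initial_time : String) (seconds : Int) (out : String) : Prop := out = sub_times_alt initial_time seconds
instance (initial_time : String) (seconds : Int) (out : String) : Decidable (Spec_sub_times initial_time seconds out) := by unfold Spec_sub_times; infer_instance

-- ===== CLAIM (what is proved, stated in full; the proofs are below) =====
def Claim_equal_sub_times : Prop := ∀ (initial_time : String) (seconds : Int), Dom_sub_times initial_time seconds → Pre_sub_times initial_time seconds → Spec_sub_times initial_time seconds (sub_times initial_time seconds)

-- ===== LEMMAS AND PROOFS =====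

-- A's borrow loop equals B's guarded closed form.
lemma pvBorrow_eq (m h : Int) :
    pvBorrow m h =
      if m < 0 then (PySem.Int.mod m 60, h + PySem.Int.floordiv m 60) else (m, h) := by
  induction m, h using pvBorrow.induct with
  | case1 m h hm ih =>
      rw [pvBorrow, if_pos hm, ih]
      have h60 : (0:Int) < 60 := by norm_num
      simp only [PySem.Int.floordiv_eq_ediv_of_pos h60, PySem.Int.mod_eq_emod_of_pos h60]
      split_ifs with h1 <;> simp only [Prod.mk.injEq] <;> constructor <;> omega
  | case2 m h hm =>
      rw [pvBorrow, if_neg hm]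
      simp [hm]

-- The outer zfill(5) in A is a no-op: each zfill(2) piece has length ≥ 2, plus the ':'.
lemma zfill5_noop (a b : String) :
    PySem.Str.zfill (PySem.Str.zfill a 2 ++ ":" ++ PySem.Str.zfill b 2) 5 =
      PySem.Str.zfill a 2 ++ ":" ++ PySem.Str.zfill b 2 := by
  have hlen : (5:Int) ≤ ((PySem.Str.zfill a 2 ++ ":" ++ PySem.Str.zfill b 2).toList.length : Int) := by
    have ha := PySem.Chars.length_zfill a.toList 2
    have hb := PySem.Chars.length_zfill b.toList 2
    have hc : (":".toList.length) = 1 := by decide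
    simp only [String.toList_append, List.length_append, PySem.Str.toList_zfill, hc]
    omega
  rw [PySem.Str.zfill, PySem.Chars.zfill.eq_def, if_pos hlen, String.ofList_toList]

-- ===== VERDICT (by name: the statement is the Claim_ definition above) =====
theorem sub_times_spec : Claim_equal_sub_times := by
  intro initial_time seconds _ hpre
  unfold Spec_sub_times sub_times sub_times_alt
  by_cases hs : seconds = 0
  · simp [hs]
  · rcases hpre with hpre | ⟨h0, h1⟩
    · exact absurd hpre hs
    · rw [if_neg hs, if_neg hs]
      obtain ⟨hv, hveq⟩ := Option.isSome_iff_exists.mp h0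
      obtain ⟨mv, mveq⟩ := Option.isSome_iff_exists.mp h1
      simp only [hveq, mveq, pvBorrow_eq]
      split_ifs with hneg <;> simp only [zfill5_noop]
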